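-- pv_equiv track=rewrite | github.com/kky990826/algorithm-daily-commit | 2025-05-21/coffee_run.py | solution
-- ===== SOURCE A (Python) =====
-- def solution(order):
--     total_ordering = 0
--     for i in range(len(order)):
--         if "americano" in order[i] or "anything" in order[i]:
--             total_ordering += 4500
--         else:
--             total_ordering += 5000
--     return total_ordering
-- ===== SOURCE B (Python) =====
-- def solution(order):
--     # divide-and-conquer summation: split the order list in half, sum the halves
--     n = len(order)
--     if n == 0:
--         return 0
--     if n == 1:
--         item = order[0]
--         return 4500 if "americano" in item or "anything" in item else 5000
--     mid = n // 2
--     return solution(order[:mid]) + solution(order[mid:])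
-- ===== Notes on version B (the rewrite author's own statement) =====
-- stated objective: alternative
-- what changed: B computes the total by divide-and-conquer: it splits the list in half, recursively sums each half, and prices a single item only at the one-element base case, instead of A's indexed branch-and-accumulate loop.
import Mathlib
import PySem

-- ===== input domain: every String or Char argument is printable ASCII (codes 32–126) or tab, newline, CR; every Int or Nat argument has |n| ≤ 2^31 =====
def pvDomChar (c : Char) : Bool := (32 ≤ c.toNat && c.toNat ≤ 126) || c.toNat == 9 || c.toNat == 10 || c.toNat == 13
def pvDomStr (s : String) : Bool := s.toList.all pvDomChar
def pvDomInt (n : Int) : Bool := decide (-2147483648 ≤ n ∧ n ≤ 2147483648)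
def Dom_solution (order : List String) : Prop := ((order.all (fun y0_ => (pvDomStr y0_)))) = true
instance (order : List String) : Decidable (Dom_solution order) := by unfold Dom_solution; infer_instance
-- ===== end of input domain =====

-- B totals the order by divide-and-conquer (split in half, recurse, price at the singleton base case) instead of A's indexed accumulate loop (objective: alternative).


-- ===== PORT A =====
-- for i in range(len(order)): if "americano" in order[i] or "anything" in order[i]: total += 4500 else: total += 5000
def solution (order : List String) : Int :=
  (PySem.List.pyRange 0 (PySem.List.len order) 1).foldl
    (fun total i =>
      if PySem.Str.isIn "americano" (PySem.List.pyGetD order i "") ||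
         PySem.Str.isIn "anything" (PySem.List.pyGetD order i "") then total + 4500
      else total + 5000)
    0

-- ===== PORT B =====
-- n == 0 → 0; n == 1 → price of order[0]; else split at mid = n//2 and recurse on order[:mid] and order[mid:]
-- (order[:mid] = take mid, order[mid:] = drop mid — exact since 0 ≤ mid ≤ n)
-- fuel (= initial length) only makes the recursion structural; it is never exhausted since each half is shorter
def solutionAltGo (fuel : Nat) (order : List String) : Int :=
  match fuel with
  | 0 => 0
  | fuel + 1 =>
    if order.length = 0 then 0
    else if order.length = 1 then
      (if PySem.Str.isIn "americano" (PySem.List.pyGetD order 0 "") ||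
          PySem.Str.isIn "anything" (PySem.List.pyGetD order 0 "") then 4500 else 5000)
    else
      solutionAltGo fuel (order.take (order.length / 2)) + solutionAltGo fuel (order.drop (order.length / 2))

def solution_alt (order : List String) : Int := solutionAltGo order.length order

-- ===== PRECONDITION & SPEC =====
def Spec_solution (order : List String) (out : Int) : Prop := out = solution_alt order
instance (order : List String) (out : Int) : Decidable (Spec_solution order out) := by unfold Spec_solution; infer_instance

-- ===== CLAIM (what is proved, stated in full; the proofs are below) =====
def Claim_equal_solution : Prop := ∀ (order : List String), Dom_solution order → Spec_solution order (solution order)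

-- ===== LEMMAS AND PROOFS =====
-- A's loop collapses to the closed form 5000·n − 500·(discounted count)
theorem foldl_branch_add (p : String → Bool) (xs : List String) (acc : Int) :
    xs.foldl (fun total s => if p s then total + 4500 else total + 5000) acc
      = acc + 5000 * (xs.length : Int) - 500 * (xs.countP p : Int) := by
  induction xs generalizing acc with
  | nil => simp
  | cons x xs ih =>
    simp only [List.foldl_cons, List.countP_cons, ih]
    by_cases h : p x = true <;> simp [h] <;> ring

-- B's divide-and-conquer also computes the same closed form (for sufficient fuel)
theorem altGo_closed (fuel : Nat) (xs : List String) (hf : xs.length ≤ fuel) :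
    solutionAltGo fuel xs
      = 5000 * (xs.length : Int)
        - 500 * ((xs.countP fun s =>
            PySem.Str.isIn "americano" s || PySem.Str.isIn "anything" s) : Int) := by
  induction fuel generalizing xs with
  | zero =>
    have : xs = [] := List.eq_nil_of_length_eq_zero (Nat.le_zero.mp hf)
    subst this; simp [solutionAltGo]
  | succ fuel ih =>
    by_cases h0 : xs.length = 0
    · have : xs = [] := List.eq_nil_of_length_eq_zero h0
      subst this; simp [solutionAltGo]
    · by_cases h1 : xs.length = 1
      · match xs, h1 with
        | [a], _ =>
          simp only [solutionAltGo, List.countP_cons]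
          norm_num
          split_ifs <;> simp_all
      · have h2 : 2 ≤ xs.length := by omega
        have hT : (xs.take (xs.length / 2)).length ≤ fuel := by
          simp only [List.length_take]; omega
        have hD : (xs.drop (xs.length / 2)).length ≤ fuel := by
          simp only [List.length_drop]; omega
        have step : solutionAltGo (fuel + 1) xs
            = solutionAltGo fuel (xs.take (xs.length / 2))
              + solutionAltGo fuel (xs.drop (xs.length / 2)) := by
          simp only [solutionAltGo]
          rw [if_neg h0, if_neg h1]
        rw [step, ih _ hT, ih _ hD]
        have hlen : (xs.take (xs.length / 2)).length + (xs.drop (xs.length / 2)).length = xs.length := by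
          simp; omega
        have hcnt : (xs.take (xs.length / 2)).countP (fun s =>
                PySem.Str.isIn "americano" s || PySem.Str.isIn "anything" s)
            + (xs.drop (xs.length / 2)).countP (fun s =>
                PySem.Str.isIn "americano" s || PySem.Str.isIn "anything" s)
            = xs.countP (fun s =>
                PySem.Str.isIn "americano" s || PySem.Str.isIn "anything" s) := by
          conv_rhs => rw [← List.take_append_drop (xs.length / 2) xs]
          rw [List.countP_append]
        omega

theorem alt_closed (xs : List String) :
    solution_alt xs
      = 5000 * (xs.length : Int)
        - 500 * ((xs.countP fun s =>
            PySem.Str.isIn "americano" s || PySem.Str.isIn "anything" s) : Int) :=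
  altGo_closed xs.length xs le_rfl

-- ===== VERDICT (by name: the statement is the Claim_ definition above) =====
theorem solution_spec : Claim_equal_solution := by
  intro order _
  unfold Spec_solution solution
  rw [PySem.List.foldl_pyRange_zero_pyGetD
      (f := fun total s =>
        if PySem.Str.isIn "americano" s || PySem.Str.isIn "anything" s then total + 4500
        else total + 5000)
      (xs := order) (d := "") (init := (0 : Int))]
  rw [foldl_branch_add, alt_closed]
  ring
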